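-- pv_equiv track=rewrite | github.com/harrywu666/ccad | cad-review-backend/services/audit_runtime/runner_observer_feed.py | _output_unstable_streak
-- ===== SOURCE A (Python) =====
-- from typing import Any, Dict, List
--
-- def _output_unstable_streak(recent_events: List[Dict[str, Any]]) -> int:
--     streak = 0
--     for event in reversed(recent_events):
--         event_kind = str(event.get("event_kind") or "").strip()
--         if event_kind == "output_validation_failed":
--             streak += 1
--             continue
--         if event_kind in {"runner_broadcast", "provider_stream_delta", "runner_observer_decision"}:
--             continue
--         break
--     return streak
-- ===== SOURCE B (Python) =====
-- from typing import Any, Dict, List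
--
-- _NEUTRAL = {"runner_broadcast", "provider_stream_delta", "runner_observer_decision"}
--
-- def _output_unstable_streak(recent_events: List[Dict[str, Any]]) -> int:
--     # Forward scan with a resetting accumulator: no reversal, no early break.
--     streak = 0
--     for event in recent_events:
--         kind = str(event.get("event_kind") or "").strip()
--         if kind == "output_validation_failed":
--             streak += 1
--         elif kind not in _NEUTRAL:
--             streak = 0
--     return streak
-- ===== Notes on version B (the rewrite author's own statement) =====
-- stated objective: alternative
-- what changed: Replaced the backward loop with early break by a single forward pass over recent_events that increments a counter on 'output_validation_failed', keeps it on the three neutral kinds, and resets it to 0 on any other kind; the trailing streak is the counter's final value.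
import Mathlib
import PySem

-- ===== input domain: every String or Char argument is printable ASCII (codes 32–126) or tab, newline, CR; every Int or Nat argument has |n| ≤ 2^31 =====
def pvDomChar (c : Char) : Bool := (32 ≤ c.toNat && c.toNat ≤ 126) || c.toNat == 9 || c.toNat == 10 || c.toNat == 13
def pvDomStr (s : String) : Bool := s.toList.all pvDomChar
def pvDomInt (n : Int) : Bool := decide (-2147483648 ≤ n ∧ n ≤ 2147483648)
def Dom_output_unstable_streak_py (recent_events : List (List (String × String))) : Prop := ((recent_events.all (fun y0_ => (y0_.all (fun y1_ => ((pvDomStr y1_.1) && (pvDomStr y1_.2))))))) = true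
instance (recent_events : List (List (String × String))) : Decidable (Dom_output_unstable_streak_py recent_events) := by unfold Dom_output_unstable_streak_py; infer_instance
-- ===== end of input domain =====

-- B replaces A's backward loop with early break by a single forward pass with a resetting counter; same O(n) cost.

-- ===== PORT A =====
-- event_kind = str(event.get("event_kind") or "").strip()  (values are strings, so str() is identity; 'or ""' maps a missing key to "")
def pvKind (e : List (String × String)) : String :=
  PySem.Str.strip (((PySem.Dict.mk e).get? "event_kind").getD "")

-- the for-loop over reversed(recent_events), carrying streak; break = return streak
def pvGoA : List (List (String × String)) → Int → Int
  | [], streak => streak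
  | e :: rest, streak =>
    let event_kind := pvKind e
    if event_kind == "output_validation_failed" then pvGoA rest (streak + 1)
    else if event_kind == "runner_broadcast" || event_kind == "provider_stream_delta" || event_kind == "runner_observer_decision" then
      pvGoA rest streak
    else streak

def output_unstable_streak_py (recent_events : List (List (String × String))) : Int :=
  pvGoA recent_events.reverse 0

-- ===== PORT B =====
def pvNeutral (k : String) : Bool :=
  k == "runner_broadcast" || k == "provider_stream_delta" || k == "runner_observer_decision"

-- one forward step: increment on the failure kind, keep on neutral kinds, reset otherwise
def pvStepB (s : Int) (e : List (String × String)) : Int :=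
  let kind := pvKind e
  if kind == "output_validation_failed" then s + 1
  else if pvNeutral kind then s
  else 0

def output_unstable_streak_py_alt (recent_events : List (List (String × String))) : Int :=
  recent_events.foldl pvStepB 0

-- ===== PRECONDITION & SPEC =====
def Spec_output_unstable_streak_py (recent_events : List (List (String × String))) (out : Int) : Prop := out = output_unstable_streak_py_alt recent_events
instance (recent_events : List (List (String × String))) (out : Int) : Decidable (Spec_output_unstable_streak_py recent_events out) := by unfold Spec_output_unstable_streak_py; infer_instance

-- ===== CLAIM (what is proved, stated in full; the proofs are below) =====
def Claim_equal_output_unstable_streak_py : Prop := ∀ (recent_events : List (List (String × String))), Dom_output_unstable_streak_py recent_events → Spec_output_unstable_streak_py recent_events (output_unstable_streak_py recent_events)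

-- ===== LEMMAS AND PROOFS =====

-- A's backward loop with accumulator s equals s + the loop started at 0
theorem pvGoA_shift (l : List (List (String × String))) (s : Int) :
    pvGoA l s = s + pvGoA l 0 := by
  induction l generalizing s with
  | nil => simp [pvGoA]
  | cons e rest ih =>
    simp only [pvGoA]
    split_ifs with h1 h2
    · rw [ih (s+1), ih (0+1)]; ring
    · exact ih s
    · ring

-- forward fold with reset = backward loop on the reversed list
theorem foldB_eq (l : List (List (String × String))) :
    l.foldl pvStepB 0 = pvGoA l.reverse 0 := by
  induction l using List.reverseRecOn with
  | nil => simp [pvGoA]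
  | append_singleton l e ih =>
    rw [List.foldl_append, List.foldl_cons, List.foldl_nil, List.reverse_append]
    simp only [List.reverse_singleton, List.singleton_append]
    rw [pvStepB]
    simp only [pvGoA, pvNeutral]
    split_ifs with h1 h2
    · rw [pvGoA_shift _ (0+1), ih]; ring
    · exact ih
    · rfl

-- ===== VERDICT (by name: the statement is the Claim_ definition above) =====
theorem output_unstable_streak_py_spec : Claim_equal_output_unstable_streak_py := by
  intro recent_events _
  unfold Spec_output_unstable_streak_py output_unstable_streak_py output_unstable_streak_py_alt
  rw [foldB_eq]
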